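-- pv_equiv track=rewrite | github.com/valeriadanalachi/Estagio | Modelos/Modelo Final com Dropout.py | raios_diametros
-- ===== SOURCE A (Python) =====
-- def raios_diametros(inf):
--     t=''
--     raios=[]
--     for i in inf:
--         if i.isdigit() or i==',' or i=='.':
--             t=t+''+i
--         if i.isalpha():
--             t=t+' '
--     t=t.split(' ')
--
--     for i in t:
--         if i!='':
--             raios.append(i)
--     return(raios)
-- ===== SOURCE B (Python) =====
-- def raios_diametros(inf):
--     raios = []
--     cur = ''
--     for c in inf:
--         if c.isdigit() or c == ',' or c == '.':
--             cur += c
--         elif c.isalpha():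
--             if cur:
--                 raios.append(cur)
--             cur = ''
--     if cur:
--         raios.append(cur)
--     return raios
-- ===== Notes on version B (the rewrite author's own statement) =====
-- stated objective: simpler
-- what changed: Single direct tokenizing pass with a current-token buffer flushed on letters, instead of building a marker string, splitting it on spaces and filtering out empty pieces in a second loop.
import Mathlib
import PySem

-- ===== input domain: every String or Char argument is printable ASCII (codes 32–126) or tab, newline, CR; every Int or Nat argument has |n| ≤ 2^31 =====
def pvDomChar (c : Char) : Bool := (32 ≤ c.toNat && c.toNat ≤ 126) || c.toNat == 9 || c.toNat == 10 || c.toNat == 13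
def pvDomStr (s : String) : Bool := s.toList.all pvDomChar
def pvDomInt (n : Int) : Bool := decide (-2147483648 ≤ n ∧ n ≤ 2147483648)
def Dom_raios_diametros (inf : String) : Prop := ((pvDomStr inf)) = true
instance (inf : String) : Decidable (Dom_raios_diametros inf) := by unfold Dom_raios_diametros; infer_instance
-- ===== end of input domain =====

-- B replaces A's build-marker-string / split-on-space / filter-nonempty pipeline by one
-- direct tokenizing pass with a current-token buffer; same return value, simpler shape.


-- ===== PORT A =====
-- A's loop body: append token chars to t, append ' ' for letters (two independent ifs, as in A)
def pvStepA (t : List Char) (i : Char) : List Char :=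
  let t := if PySem.Chars.isdigit i || i == ',' || i == '.' then t ++ [i] else t
  if PySem.Chars.isalpha i then t ++ [' '] else t

def raios_diametros (inf : String) : List String :=
  let t := inf.toList.foldl pvStepA []
  let parts := PySem.Chars.splitOn t [' ']
  (parts.foldl (fun raios i => if i ≠ [] then raios ++ [i] else raios)
    ([] : List (List Char))).map (fun p => String.ofList p)

-- ===== PORT B =====
-- B's loop body: extend the current-token buffer on token chars, flush it on letters
def pvStepB (p : List (List Char) × List Char) (c : Char) : List (List Char) × List Char :=
  if PySem.Chars.isdigit c || c == ',' || c == '.' then (p.1, p.2 ++ [c])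
  else if PySem.Chars.isalpha c then ((if p.2 ≠ [] then p.1 ++ [p.2] else p.1), [])
  else p

def raios_diametros_alt (inf : String) : List String :=
  let p := inf.toList.foldl pvStepB ([], [])
  (if p.2 ≠ [] then p.1 ++ [p.2] else p.1).map (fun x => String.ofList x)

-- ===== PRECONDITION & SPEC =====
def Spec_raios_diametros (inf : String) (out : List String) : Prop := out = raios_diametros_alt inf
instance (inf : String) (out : List String) : Decidable (Spec_raios_diametros inf out) := by unfold Spec_raios_diametros; infer_instance

-- ===== CLAIM (what is proved, stated in full; the proofs are below) =====
def Claim_equal_raios_diametros : Prop := ∀ (inf : String), Dom_raios_diametros inf → Spec_raios_diametros inf (raios_diametros inf)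

-- ===== LEMMAS AND PROOFS =====

-- simple cons-structured model of splitting on a single character
def mySplit (s : Char) : List Char → List (List Char)
  | [] => [[]]
  | c :: r => if c = s then [] :: mySplit s r else (mySplit s r).modifyHead (c :: ·)

lemma splitOn_go_eq (s : Char) :
    ∀ (fuel : Nat) (l : List Char), l.length < fuel → ∀ (cur : List Char) (acc : List (List Char)),
    PySem.Chars.splitOn.go [s] fuel l cur acc
      = acc.reverse ++ (mySplit s l).modifyHead (cur.reverse ++ ·) := by
  intro fuel
  induction fuel with
  | zero => intro l h; omega
  | succ f ih =>
    intro l h cur acc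
    cases l with
    | nil =>
      rw [PySem.Chars.splitOn.go.eq_def]
      simp [mySplit]
    | cons c rest =>
      rw [PySem.Chars.splitOn.go.eq_def]
      simp only [List.isPrefixOf, Bool.and_true]
      by_cases hc : s = c
      · subst hc
        simp only [beq_self_eq_true, if_pos, List.length_cons, List.length_nil,
          Nat.zero_add, List.drop_succ_cons, List.drop_zero]
        rw [ih rest (by simpa using Nat.lt_of_succ_lt_succ h) [] (cur.reverse :: acc)]
        simp [mySplit]
        cases mySplit s rest <;> rfl
      · have : (s == c) = false := by simpa using hc
        simp only [this, Bool.false_eq_true, if_false]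
        rw [ih rest (by simpa using Nat.lt_of_succ_lt_succ h) (c :: cur) acc]
        have hne : ¬ c = s := fun h' => hc h'.symm
        simp [mySplit, hne, List.modifyHead_modifyHead]
        cases mySplit s rest with
        | nil => simp
        | cons a as => simp

lemma splitOn_eq_mySplit (s : Char) (t : List Char) :
    PySem.Chars.splitOn t [s] = mySplit s t := by
  show PySem.Chars.splitOn.go [s] (t.length + 1) t [] [] = mySplit s t
  rw [splitOn_go_eq s (t.length + 1) t (by omega) [] []]
  cases mySplit s t <;> simp

lemma mySplit_no_sep (s : Char) (p : List Char) (h : s ∉ p) : mySplit s p = [p] := by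
  induction p with
  | nil => rfl
  | cons c r ih =>
    have hcs : ¬ c = s := fun h' => h (h' ▸ List.mem_cons_self)
    simp [mySplit, hcs, ih (fun hm => h (List.mem_cons_of_mem _ hm))]

lemma mySplit_append_sep (s : Char) (p z : List Char) (h : s ∉ p) :
    mySplit s (p ++ s :: z) = p :: mySplit s z := by
  induction p with
  | nil => simp [mySplit]
  | cons c r ih =>
    have hcs : ¬ c = s := fun h' => h (h' ▸ List.mem_cons_self)
    simp only [List.cons_append, mySplit, hcs, if_false,
      ih (fun hm => h (List.mem_cons_of_mem _ hm))]
    rfl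

-- what A's loop body appends to t for one character
def pvEmit (c : Char) : List Char :=
  (if PySem.Chars.isdigit c || c == ',' || c == '.' then [c] else []) ++
  (if PySem.Chars.isalpha c then [' '] else [])

lemma stepA_eq (t : List Char) (c : Char) : pvStepA t c = t ++ pvEmit c := by
  unfold pvStepA pvEmit
  split_ifs <;> simp

lemma foldA_eq (cs : List Char) : ∀ t : List Char,
    cs.foldl pvStepA t = t ++ cs.flatMap pvEmit := by
  induction cs with
  | nil => simp
  | cons c cs ih => intro t; simp [List.foldl_cons, stepA_eq, ih, List.flatMap_cons]

lemma tok_ne_space (c : Char) (h : (PySem.Chars.isdigit c || c == ',' || c == '.') = true) :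
    c ≠ ' ' := by
  rintro rfl
  simp [PySem.Chars.isdigit] at h

lemma tok_not_alpha (c : Char) (h : (PySem.Chars.isdigit c || c == ',' || c == '.') = true) :
    PySem.Chars.isalpha c = false := by
  simp [PySem.Chars.isdigit] at h
  rcases h with (⟨h1, h2⟩ | h) | h
  · simp only [PySem.Chars.isalpha, PySem.Chars.isupper, PySem.Chars.islower]
    simp only [Char.le_def, UInt32.le_iff_toNat_le] at *
    simp only [Bool.or_eq_false_iff, Bool.and_eq_false_iff, decide_eq_false_iff_not, not_le]
    have e0 : ('0'.val).toNat = 48 := by decide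
    have e9 : ('9'.val).toNat = 57 := by decide
    have eA : ('A'.val).toNat = 65 := by decide
    have eZ : ('Z'.val).toNat = 90 := by decide
    have ea : ('a'.val).toNat = 97 := by decide
    have ez : ('z'.val).toNat = 122 := by decide
    omega
  · subst h; decide
  · subst h; decide

-- B's flush at end of loop
def pvFlush (p : List (List Char) × List Char) : List (List Char) :=
  if p.2 ≠ [] then p.1 ++ [p.2] else p.1

lemma main_inv (cs : List Char) : ∀ (acc : List (List Char)) (cur : List Char), ' ' ∉ cur →
    acc ++ (mySplit ' ' (cur ++ cs.flatMap pvEmit)).filter (fun i => i ≠ []) =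
    pvFlush (cs.foldl pvStepB (acc, cur)) := by
  induction cs with
  | nil =>
    intro acc cur hcur
    simp only [List.flatMap_nil, List.append_nil, List.foldl_nil, pvFlush,
      mySplit_no_sep ' ' cur hcur]
    by_cases h : cur = []
    · subst h; simp
    · simp [h]
  | cons c cs ih =>
    intro acc cur hcur
    simp only [List.flatMap_cons, List.foldl_cons]
    by_cases ht : (PySem.Chars.isdigit c || c == ',' || c == '.') = true
    · -- token character: extend the buffer
      have hna := tok_not_alpha c ht
      have hstep : pvStepB (acc, cur) c = (acc, cur ++ [c]) := by
        simp [pvStepB, ht]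
      rw [hstep]
      have hper : pvEmit c = [c] := by simp [pvEmit, ht, hna]
      rw [hper]
      have : cur ++ ([c] ++ cs.flatMap pvEmit) = (cur ++ [c]) ++ cs.flatMap pvEmit := by
        simp
      rw [this]
      exact ih acc (cur ++ [c]) (by
        intro hm
        rcases List.mem_append.mp hm with hm | hm
        · exact hcur hm
        · exact tok_ne_space c ht (List.mem_singleton.mp hm).symm)
    · by_cases ha : PySem.Chars.isalpha c = true
      · -- letter: flush the buffer
        have ht' : (PySem.Chars.isdigit c || c == ',' || c == '.') = false := by simpa using ht
        have hstep : pvStepB (acc, cur) c = ((if cur ≠ [] then acc ++ [cur] else acc), []) := by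
          simp only [pvStepB, ht', Bool.false_eq_true, if_false, ha, if_true]
        rw [hstep]
        have hper : pvEmit c = [' '] := by simp [pvEmit, ht, ha]
        rw [hper]
        have : cur ++ ([' '] ++ cs.flatMap pvEmit) = cur ++ ' ' :: cs.flatMap pvEmit := by simp
        rw [this, mySplit_append_sep ' ' cur _ hcur]
        rw [← ih (if cur ≠ [] then acc ++ [cur] else acc) [] (by simp)]
        by_cases h : cur = []
        · subst h; simp
        · simp [h]
      · -- other character: ignored
        have ht' : (PySem.Chars.isdigit c || c == ',' || c == '.') = false := by simpa using ht
        have ha' : PySem.Chars.isalpha c = false := by simpa using ha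
        have hstep : pvStepB (acc, cur) c = (acc, cur) := by
          simp only [pvStepB, ht', ha', Bool.false_eq_true, if_false]
        rw [hstep]
        have hper : pvEmit c = [] := by simp [pvEmit, ht, ha]
        rw [hper]
        simpa using ih acc cur hcur

-- ===== VERDICT (by name: the statement is the Claim_ definition above) =====
theorem raios_diametros_spec : Claim_equal_raios_diametros := by
  intro inf _
  unfold Spec_raios_diametros raios_diametros raios_diametros_alt
  dsimp only
  rw [foldA_eq inf.toList [], List.nil_append, splitOn_eq_mySplit]
  rw [show (fun (raios : List (List Char)) (i : List Char) =>
        if i ≠ [] then raios ++ [i] else raios)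
      = (fun raios i => if (fun j => decide (j ≠ [])) i = true then raios ++ [(fun j => j) i] else raios) from by
    funext r i; simp]
  rw [PySem.List.foldl_append_if (fun j => decide (j ≠ [])) (fun j => j) _ []]
  simp only [List.nil_append, List.map_id']
  have := main_inv inf.toList [] [] (by simp)
  simp only [List.nil_append] at this
  rw [this]
  rfl
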